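-- pv_equiv track=rewrite | github.com/skandagpt/Information-Security-Lab | rsa.py | numtoalph
-- ===== SOURCE A (Python) =====
-- def numtoalph(msg):
--     res = ''
--     while msg:
--         imp = msg%10
--         msg = msg//10
--         strmsg = chr(imp + 65)
--         res = strmsg + res
--     return res
-- ===== SOURCE B (Python) =====
-- def numtoalph(msg):
--     if msg == 0:
--         return ''
--     return ''.join(chr(int(d) + 65) for d in str(msg))
-- ===== Notes on version B (the rewrite author's own statement) =====
-- stated objective: idiomatic
-- what changed: Replaces the arithmetic digit-extraction loop with string prepending by a single forward pass over str(msg), mapping each decimal digit character to its letter (with an explicit empty-string guard for zero).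
import Mathlib
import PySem

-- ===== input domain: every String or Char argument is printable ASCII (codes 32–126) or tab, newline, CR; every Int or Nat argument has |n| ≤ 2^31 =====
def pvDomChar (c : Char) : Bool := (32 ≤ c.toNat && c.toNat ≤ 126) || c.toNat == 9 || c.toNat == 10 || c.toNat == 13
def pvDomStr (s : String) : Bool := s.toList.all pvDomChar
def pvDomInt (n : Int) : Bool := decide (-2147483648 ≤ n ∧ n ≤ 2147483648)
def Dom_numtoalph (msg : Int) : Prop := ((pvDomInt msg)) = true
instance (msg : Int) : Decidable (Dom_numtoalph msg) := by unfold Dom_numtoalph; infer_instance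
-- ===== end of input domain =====

-- B changes the algorithm: one forward pass over str(msg) instead of A's arithmetic
-- digit-extraction loop with string prepending (idiomatic, same cost for small ints).

-- ===== PORT A =====
-- A's while-loop, recursing on msg as a Nat: exact for msg ≥ 0 (= Pre_numtoalph), where
-- Python's msg%10 and msg//10 agree with Nat.mod/Nat.div; for negative msg A never terminates.
def numtoalphLoop (msg : Nat) (res : String) : String :=
  if msg = 0 then res
  else numtoalphLoop (msg / 10) (String.ofList [Char.ofNat (msg % 10 + 65)] ++ res)
  termination_by msg
  decreasing_by exact Nat.div_lt_self (Nat.pos_of_ne_zero (by assumption)) (by norm_num)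

def numtoalph (msg : Int) : String := numtoalphLoop msg.toNat ""

-- ===== PORT B =====
-- int(d) on the single decimal digit character d is d.toNat - 48 (exact: str(msg) for
-- msg > 0 consists of digit characters only).
def numtoalph_alt (msg : Int) : String :=
  if msg = 0 then ""
  else String.ofList (((PySem.Int.toStr msg).toList).map (fun c => Char.ofNat (c.toNat - 48 + 65)))

-- ===== PRECONDITION & SPEC =====
-- Pre_ excludes negative msg, on which A's while-loop never terminates (msg//10 stays -1).
def Pre_numtoalph (msg : Int) : Prop := 0 ≤ msg
instance (msg : Int) : Decidable (Pre_numtoalph msg) := by unfold Pre_numtoalph; infer_instance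
def pvWitness_numtoalph : Int := (375)

def Spec_numtoalph (msg : Int) (out : String) : Prop := out = numtoalph_alt msg
instance (msg : Int) (out : String) : Decidable (Spec_numtoalph msg out) := by unfold Spec_numtoalph; infer_instance

-- ===== CLAIM (what is proved, stated in full; the proofs are below) =====
def Claim_equal_numtoalph : Prop := ∀ (msg : Int), Dom_numtoalph msg → Pre_numtoalph msg → Spec_numtoalph msg (numtoalph msg)

-- ===== LEMMAS AND PROOFS =====

-- the letter list A's loop builds, MSB first
def digsA (n : Nat) : List Char :=
  if n = 0 then [] else digsA (n / 10) ++ [Char.ofNat (n % 10 + 65)]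
  termination_by n
  decreasing_by exact Nat.div_lt_self (Nat.pos_of_ne_zero (by assumption)) (by norm_num)

theorem toList_numtoalphLoop (n : Nat) (res : String) :
    (numtoalphLoop n res).toList = digsA n ++ res.toList := by
  induction n using Nat.strong_induction_on generalizing res with
  | _ n ih =>
    rw [numtoalphLoop, digsA]
    by_cases h : n = 0
    · simp [h]
    · simp only [h, if_false]
      rw [ih (n / 10) (Nat.div_lt_self (Nat.pos_of_ne_zero h) (by norm_num))]
      simp

theorem digitChar_letter (d : Nat) (hd : d < 10) :
    Char.ofNat ((Nat.digitChar d).toNat - 48 + 65) = Char.ofNat (d + 65) := by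
  interval_cases d <;> decide

theorem toDigitsCore_append (b f n : Nat) (l : List Char) :
    Nat.toDigitsCore b f n l = Nat.toDigitsCore b f n [] ++ l := by
  induction f generalizing n l with
  | zero => simp [Nat.toDigitsCore]
  | succ f ih =>
    simp only [Nat.toDigitsCore]
    by_cases h : n / b = 0
    · simp [h]
    · simp only [h, if_false]
      rw [ih (n / b) (Nat.digitChar (n % b) :: l), ih (n / b) [Nat.digitChar (n % b)]]
      simp

theorem toDigitsCore_map (f n : Nat) (hf : n < f) (hn : n ≠ 0) :
    (Nat.toDigitsCore 10 f n []).map (fun c => Char.ofNat (c.toNat - 48 + 65)) = digsA n := by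
  induction n using Nat.strong_induction_on generalizing f with
  | _ n ih =>
    cases f with
    | zero => omega
    | succ f =>
      rw [digsA]
      simp only [hn, if_false, Nat.toDigitsCore]
      by_cases h : n / 10 = 0
      · rw [digsA]
        simp [h, digitChar_letter (n % 10) (Nat.mod_lt n (by norm_num))]
      · simp only [h, if_false]
        rw [toDigitsCore_append, List.map_append,
          ih (n / 10) (Nat.div_lt_self (Nat.pos_of_ne_zero hn) (by norm_num)) f
            (by omega) h]
        simp [digitChar_letter (n % 10) (Nat.mod_lt n (by norm_num))]

theorem numtoalph_spec : Claim_equal_numtoalph := by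
  intro msg _ hpre
  unfold Spec_numtoalph numtoalph numtoalph_alt
  by_cases h0 : msg = 0
  · subst h0
    show numtoalphLoop (Int.toNat 0) "" = _
    rw [numtoalphLoop]
    simp
  · have hneg : ¬ msg < 0 := not_lt.mpr hpre
    have hnat : msg.toNat ≠ 0 := by omega
    simp only [h0, if_false]
    apply String.toList_injective
    rw [toList_numtoalphLoop]
    simp only [PySem.Int.toStr, PySem.Int.toChars, hneg, if_false]
    simp only [String.toList_ofList]
    rw [Nat.toDigits, toDigitsCore_map (msg.toNat + 1) msg.toNat (by omega) hnat]
    simp
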